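-- pv_equiv track=rewrite | github.com/slvfmts/seo-blog | src/services/writing_pipeline/stages/seo_analyzer.py | _count_phrase_in_lemmas
-- ===== SOURCE A (Python) =====
-- def _count_phrase_in_lemmas(text_lemmas: list[str], phrase_lemmas: list[str]) -> int:
--     """
--     Count occurrences of a phrase (as lemma sequence) in text lemmas.
--
--     For single-word keywords, counts individual occurrences.
--     For multi-word keywords, counts sequential matches.
--     """
--     if not phrase_lemmas:
--         return 0
--
--     if len(phrase_lemmas) == 1:
--         target = phrase_lemmas[0]
--         return sum(1 for lemma in text_lemmas if lemma == target)
--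
--     # Multi-word: sliding window
--     count = 0
--     phrase_len = len(phrase_lemmas)
--     for i in range(len(text_lemmas) - phrase_len + 1):
--         if text_lemmas[i:i + phrase_len] == phrase_lemmas:
--             count += 1
--     return count
-- ===== SOURCE B (Python) =====
-- def _count_phrase_in_lemmas(text_lemmas: list[str], phrase_lemmas: list[str]) -> int:
--     """
--     Count occurrences of a phrase (as lemma sequence) in text lemmas.
--
--     KMP: one left-to-right scan over the text with a longest-border fallback
--     table (classic prefix-function build), instead of comparing a window slice
--     against the phrase at every position.
--     """
--     m = len(phrase_lemmas)
--     if m == 0: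
--         return 0
--
--     # border[k] = length of the longest proper border of phrase_lemmas[:k]
--     border = [0] * (m + 1)
--     for k in range(2, m + 1):
--         j = border[k - 1]
--         while j > 0 and phrase_lemmas[j] != phrase_lemmas[k - 1]:
--             j = border[j]
--         if phrase_lemmas[j] == phrase_lemmas[k - 1]:
--             j += 1
--         border[k] = j
--
--     count = 0
--     k = 0
--     for word in text_lemmas:
--         while k > 0 and phrase_lemmas[k] != word:
--             k = border[k]
--         if phrase_lemmas[k] == word:
--             k += 1
--         if k == m:
--             count += 1
--             k = border[m]
--     return count
-- ===== Notes on version B (the rewrite author's own statement) =====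
-- stated objective: alternative
-- what changed: Replaces the per-position window-slice comparison (and the separate single-word branch) by a single left-to-right KMP scan with a precomputed longest-border fallback table, so no window slice is ever materialised.
import Mathlib
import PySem

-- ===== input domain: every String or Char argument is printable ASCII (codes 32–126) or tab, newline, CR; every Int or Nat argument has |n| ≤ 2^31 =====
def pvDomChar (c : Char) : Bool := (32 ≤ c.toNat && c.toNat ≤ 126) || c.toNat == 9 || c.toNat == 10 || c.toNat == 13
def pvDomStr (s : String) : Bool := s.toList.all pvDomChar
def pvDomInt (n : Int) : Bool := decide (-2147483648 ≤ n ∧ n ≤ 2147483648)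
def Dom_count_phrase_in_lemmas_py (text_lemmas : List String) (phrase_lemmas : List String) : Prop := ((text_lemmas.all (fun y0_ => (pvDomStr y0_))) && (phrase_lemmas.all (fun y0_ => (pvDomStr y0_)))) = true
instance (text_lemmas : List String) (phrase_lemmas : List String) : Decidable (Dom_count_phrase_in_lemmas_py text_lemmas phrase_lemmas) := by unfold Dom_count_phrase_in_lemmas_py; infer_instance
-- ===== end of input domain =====

-- B replaces the per-position window-slice comparison by a single KMP pass with a longest-border fallback table (objective: alternative algorithm).


-- ===== PORT A =====
def count_phrase_in_lemmas_py (text_lemmas : List String) (phrase_lemmas : List String) : Int :=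
  if phrase_lemmas = [] then 0
  else if phrase_lemmas.length = 1 then
    -- target = phrase_lemmas[0] (list nonempty here); sum(1 for lemma in text_lemmas if lemma == target)
    let target := phrase_lemmas.headD ""
    text_lemmas.foldl (fun acc lemma_ => if lemma_ == target then acc + 1 else acc) 0
  else
    let phrase_len : Int := phrase_lemmas.length
    (PySem.List.pyRange 0 ((text_lemmas.length : Int) - phrase_len + 1) 1).foldl
      (fun count i =>
        if PySem.List.slice text_lemmas (some i) (some (i + phrase_len)) = phrase_lemmas
        then count + 1 else count) 0


-- ===== PORT B =====
-- while k > 0 and phrase_lemmas[k] != word: k = border[k]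
-- (the state k, a Python int that stays a natural number, is carried as a Nat;
--  the fuel argument, kept equal to at least k, only makes the recursion structural)
def pvShift (p : List String) (border : List Int) (word : String) : Nat → Nat → Nat
  | _, 0 => 0
  | 0, k => k
  | fuel + 1, k + 1 =>
      if (PySem.List.pyGetD p ((k + 1 : Nat) : Int) "") ≠ word then
        pvShift p border word fuel (PySem.List.pyGetD border ((k + 1 : Nat) : Int) 0).toNat
      else k + 1


-- one iteration of 'for k in range(2, m + 1)': j = border[k-1]; the shared while
-- loop (pvShift); j += 1 on a match; border[k] = j
def pvBuildStep (p : List String) (bd : List Int) (k : Int) : List Int :=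
  let x := PySem.List.pyGetD p (k - 1) ""
  let j0 := (PySem.List.pyGetD bd (k - 1) 0).toNat
  let j1 := pvShift p bd x j0 j0
  let j2 : Int := if PySem.List.pyGetD p (j1 : Int) "" == x then (j1 : Int) + 1 else (j1 : Int)
  PySem.List.pySetD bd k j2

-- body of 'for word in text_lemmas' with state (count, k)
def pvKmpStep (p : List String) (border : List Int) (m : Nat) (acc : Int × Nat) (word : String) : Int × Nat :=
  let k1 := pvShift p border word acc.2 acc.2
  let k2 := if PySem.List.pyGetD p (k1 : Int) "" == word then k1 + 1 else k1
  if k2 = m then (acc.1 + 1, (PySem.List.pyGetD border (m : Int) 0).toNat) else (acc.1, k2)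

def count_phrase_in_lemmas_py_alt (text_lemmas : List String) (phrase_lemmas : List String) : Int :=
  let m := phrase_lemmas.length
  if m = 0 then 0
  else
    -- border = [0]*(m+1); for k in range(2, m+1): ... border[k] = j
    let border := (PySem.List.pyRange 2 ((m : Int) + 1) 1).foldl (pvBuildStep phrase_lemmas)
      (PySem.List.pyRepeat [(0 : Int)] ((m : Int) + 1))
    (text_lemmas.foldl (pvKmpStep phrase_lemmas border m) (0, 0)).1


-- ===== PRECONDITION & SPEC =====
def Spec_count_phrase_in_lemmas_py (text_lemmas : List String) (phrase_lemmas : List String) (out : Int) : Prop := out = count_phrase_in_lemmas_py_alt text_lemmas phrase_lemmas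
instance (text_lemmas : List String) (phrase_lemmas : List String) (out : Int) : Decidable (Spec_count_phrase_in_lemmas_py text_lemmas phrase_lemmas out) := by unfold Spec_count_phrase_in_lemmas_py; infer_instance

-- ===== CLAIM (what is proved, stated in full; the proofs are below) =====
def Claim_equal_count_phrase_in_lemmas_py : Prop := ∀ (text_lemmas : List String) (phrase_lemmas : List String), Dom_count_phrase_in_lemmas_py text_lemmas phrase_lemmas → Spec_count_phrase_in_lemmas_py text_lemmas phrase_lemmas (count_phrase_in_lemmas_py text_lemmas phrase_lemmas)

-- ===== LEMMAS AND PROOFS =====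

-- generic findGreatest facts ------------------------------------------------

theorem pvFG_eq_self {P : Nat → Prop} [DecidablePred P] {b : Nat} (h : P b) :
    Nat.findGreatest P b = b := by
  cases b with
  | zero => rfl
  | succ n => rw [Nat.findGreatest_succ, if_pos h]

theorem pvFG_skip {P : Nat → Prop} [DecidablePred P] {b : Nat} :
    ∀ {a : Nat}, b ≤ a → (∀ r, b < r → r ≤ a → ¬ P r) →
    Nat.findGreatest P a = Nat.findGreatest P b := by
  intro a
  induction a with
  | zero => intro hba _; interval_cases b; rfl
  | succ n ih =>
      intro hba h
      rcases Nat.eq_or_lt_of_le hba with rfl | hlt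
      · rfl
      · rw [Nat.findGreatest_succ, if_neg (h _ hlt le_rfl)]
        exact ih (Nat.lt_succ_iff.mp hlt) (fun r h1 h2 => h r h1 (Nat.le_succ_of_le h2))

theorem pvFG_congr {P Q : Nat → Prop} [DecidablePred P] [DecidableQ : DecidablePred Q] :
    ∀ {b : Nat}, (∀ r, r ≤ b → (P r ↔ Q r)) →
    Nat.findGreatest P b = Nat.findGreatest Q b := by
  intro b
  induction b with
  | zero => intro _; rfl
  | succ n ih =>
      intro h
      rw [Nat.findGreatest_succ, Nat.findGreatest_succ]
      by_cases hP : P (n+1)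
      · rw [if_pos hP, if_pos ((h _ le_rfl).mp hP)]
      · rw [if_neg hP, if_neg (fun hQ => hP ((h _ le_rfl).mpr hQ))]
        exact ih (fun r hr => h r (Nat.le_succ_of_le hr))

-- descending linear search (first hit from above, default 0) IS findGreatest
-- suffix toolbox -------------------------------------------------------------

theorem pvSuffix_of_suffix_le {α : Type} {l₁ l₂ u : List α}
    (h1 : l₁ <:+ u) (h2 : l₂ <:+ u) (hle : l₁.length ≤ l₂.length) : l₁ <:+ l₂ := by
  have := List.prefix_of_prefix_length_le (List.reverse_prefix.mpr h1)
    (List.reverse_prefix.mpr h2) (by simpa using hle)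
  exact List.reverse_prefix.mp this

theorem pvConcat_suffix_concat {α : Type} {l u : List α} {a x : α} :
    l ++ [a] <:+ u ++ [x] ↔ a = x ∧ l <:+ u := by
  rw [← List.reverse_prefix]
  simp [List.cons_prefix_cons]

-- phrase[:r] is a suffix of u++[x]  ↔  phrase[:r-1] is a suffix of u and phrase[r-1] = x
theorem pvTake_suffix_snoc {p u : List String} {x : String} {r : Nat}
    (h1 : 1 ≤ r) (h2 : r ≤ p.length) :
    (p.take r <:+ u ++ [x]) ↔ (p.take (r-1) <:+ u ∧ p.getD (r-1) "" = x) := by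
  have hr : r - 1 < p.length := by omega
  have ht : p.take r = p.take (r-1) ++ [p.getD (r-1) ""] := by
    conv_lhs => rw [show r = (r-1) + 1 by omega]
    rw [List.take_add_one, List.getElem?_eq_getElem hr, List.getD_eq_getElem _ _ hr]
    rfl
  rw [ht, pvConcat_suffix_concat, and_comm]

-- suffix-of-prefix characterisation used by the border table
-- window match at start i  ↔  full-phrase suffix at end i + m
theorem pvEnd_iff_start {p t : List String} {i : Nat} (h : p.length + i ≤ t.length) :
    (p <:+ t.take (p.length + i)) ↔ (p <+: t.drop i) := by
  have hlen : (t.take (p.length + i)).length = p.length + i := by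
    rw [List.length_take]; omega
  have hd : (t.take (p.length + i)).drop i = (t.drop i).take p.length := by
    rw [List.drop_take]; congr 1; omega
  rw [List.suffix_iff_eq_drop, hlen, List.prefix_iff_eq_take,
      show p.length + i - p.length = i by omega, hd]

-- countP over an initial segment of range ------------------------------------

theorem pvCountP_range_eq_of_false_above {P : Nat → Bool} {a b : Nat}
    (hab : a ≤ b) (h : ∀ k, a ≤ k → k < b → ¬ P k = true) :
    (List.range b).countP P = (List.range a).countP P := by
  obtain ⟨c, rfl⟩ := Nat.exists_eq_add_of_le hab
  rw [show List.range (a + c) = List.range a ++ (List.range c).map (a + ·) by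
        simpa using List.range_add,
      List.countP_append, List.countP_map]
  have h0 : ((List.range c).countP (P ∘ (a + ·))) = 0 :=
    List.countP_eq_zero.mpr (fun j hj => h _ (Nat.le_add_right _ _) (by simpa using List.mem_range.mp hj))
  omega

-- the count of phrase-end positions equals the count of window-start positions
theorem pvCount_reindex {p t : List String} (hp : p ≠ []) :
    (List.range (t.length + 1)).countP (fun j => decide (p <:+ t.take j))
      = (List.range (t.length + 1)).countP (fun i => decide (p <+: t.drop i)) := by
  by_cases hmn : p.length ≤ t.length
  · have hsplit : List.range (t.length + 1)
        = List.range p.length ++ (List.range (t.length + 1 - p.length)).map (p.length + ·) := by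
      rw [show t.length + 1 = p.length + (t.length + 1 - p.length) by omega]
      simpa using List.range_add
    conv_lhs => rw [hsplit]
    rw [List.countP_append, List.countP_map]
    have hz : (List.range p.length).countP (fun j => decide (p <:+ t.take j)) = 0 := by
      rw [List.countP_eq_zero]
      intro j hj
      simp only [decide_eq_true_eq]
      intro hs
      have := hs.length_le
      rw [List.length_take] at this
      have hj' := List.mem_range.mp hj
      omega
    rw [hz, Nat.zero_add]
    have hc : ((List.range (t.length + 1 - p.length)).countP
          ((fun j => decide (p <:+ t.take j)) ∘ (p.length + ·)))
        = (List.range (t.length + 1 - p.length)).countP (fun i => decide (p <+: t.drop i)) := by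
      apply List.countP_congr
      intro i hi
      have hi' := List.mem_range.mp hi
      simp only [Function.comp_apply, decide_eq_true_eq]
      exact pvEnd_iff_start (by omega)
    rw [hc]
    refine (pvCountP_range_eq_of_false_above
      (show t.length + 1 - p.length ≤ t.length + 1 by omega) ?_).symm
    intro k hk hk'
    simp only [decide_eq_true_eq]
    intro hpre
    have := hpre.length_le
    rw [List.length_drop] at this
    have hplen : 0 < p.length := List.length_pos_iff.mpr hp
    omega
  · have hplen : 0 < p.length := List.length_pos_iff.mpr hp
    have z1 : (List.range (t.length + 1)).countP (fun j => decide (p <:+ t.take j)) = 0 := by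
      rw [List.countP_eq_zero]
      intro j hj
      simp only [decide_eq_true_eq]
      intro hs
      have := hs.length_le
      rw [List.length_take] at this
      omega
    have z2 : (List.range (t.length + 1)).countP (fun i => decide (p <+: t.drop i)) = 0 := by
      rw [List.countP_eq_zero]
      intro j hj
      simp only [decide_eq_true_eq]
      intro hpre
      have := hpre.length_le
      rw [List.length_drop] at this
      omega
    rw [z1, z2]


-- A-side: the sliding-window count is the end-position count -----------------

theorem pvOccStart_singleton (x : String) (t : List String) :
    (List.range (t.length + 1)).countP (fun i => decide ([x] <+: t.drop i)) = t.count x := by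
  induction t with
  | nil => simp [List.range_succ]
  | cons w ts ih =>
      rw [show (w :: ts).length + 1 = (ts.length + 1) + 1 by simp,
          List.range_succ_eq_map, List.countP_cons, List.countP_map]
      have hcomp : ((fun i => decide ([x] <+: (w :: ts).drop i)) ∘ Nat.succ)
          = (fun i => decide ([x] <+: ts.drop i)) := by
        funext i; simp
      rw [hcomp, ih, List.count_cons]
      by_cases h : w = x
      · subst h; simp [List.cons_prefix_cons]
      · have h' : ¬ (x = w) := fun e => h e.symm
        simp [List.cons_prefix_cons, h, h']

theorem pvA_eq_occEnd {t p : List String} (hp : p ≠ []) :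
    count_phrase_in_lemmas_py t p
      = ((List.range (t.length + 1)).countP (fun j => decide (p <:+ t.take j)) : Int) := by
  rw [pvCount_reindex hp]
  by_cases hm1 : p.length = 1
  · obtain ⟨x, rfl⟩ := List.length_eq_one_iff.mp hm1
    rw [count_phrase_in_lemmas_py, if_neg hp, if_pos hm1]
    rw [PySem.List.foldl_beq_add_one]
    rw [pvOccStart_singleton]
    simp
  · have hm2 : 2 ≤ p.length := by
      have := List.length_pos_iff.mpr hp; omega
    rw [count_phrase_in_lemmas_py, if_neg hp, if_neg hm1]
    rw [PySem.List.foldl_ite_add_one]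
    rw [PySem.List.pyRange_one, List.countP_map]
    have hN : ((t.length : Int) - p.length + 1 - 0).toNat = (t.length + 1) - p.length := by omega
    rw [hN]
    have hc : ((fun i => decide (PySem.List.slice t (some i) (some (i + (p.length : Int))) = p))
          ∘ (fun k : Nat => (0 : Int) + k))
        = (fun k : Nat => decide (p <+: t.drop k)) := by
      funext k
      simp only [Function.comp_apply, zero_add]
      refine decide_eq_decide.mpr ?_
      rw [PySem.List.slice_natCast_add, List.prefix_iff_eq_take]
      exact eq_comm
    rw [hc]
    have hfalse : ∀ k, (t.length + 1) - p.length ≤ k → k < t.length + 1 →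
        ¬ ((fun k : Nat => decide (p <+: t.drop k)) k) = true := by
      intro k hk hk'
      simp only [decide_eq_true_eq]
      intro hpre
      have := hpre.length_le
      rw [List.length_drop] at this
      omega
    rw [pvCountP_range_eq_of_false_above
      (show (t.length + 1) - p.length ≤ t.length + 1 by omega) hfalse]
    simp

-- B-side: border table, shift loop, scan invariant ---------------------------

-- the mathematical border function: longest r < k with phrase[:r] a suffix of phrase[:k]
def pvBord (p : List String) (k : Nat) : Nat :=
  Nat.findGreatest (fun r => p.take r <:+ p.take k) (k - 1)

-- the KMP state after reading u: longest r < m with phrase[:r] a suffix of u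
def pvK (p u : List String) : Nat :=
  Nat.findGreatest (fun r => p.take r <:+ u) (p.length - 1)

theorem pvShift_eq {p u : List String} {x : String} {bd : List Int} :
    ∀ (fuel k : Nat), k ≤ fuel → k < p.length → p.take k <:+ u →
    (∀ i, 1 ≤ i → i ≤ k → PySem.List.pyGetD bd (i : Int) 0 = (pvBord p i : Int)) →
    pvShift p bd x fuel k
      = Nat.findGreatest (fun r => p.take r <:+ u ∧ p.getD r "" = x) k := by
  intro fuel
  induction fuel with
  | zero =>
      intro k hk _ _ _
      interval_cases k
      rfl
  | succ f ih =>
      intro k hk hkm hsfx hbd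
      cases k with
      | zero => rfl
      | succ k' =>
          rw [pvShift]
          rw [PySem.List.pyGetD_natCast]
          by_cases hx : p.getD (k'+1) "" = x
          · rw [if_neg (by simpa using hx)]
            exact (pvFG_eq_self ⟨hsfx, hx⟩).symm
          · rw [if_pos (by simpa using hx)]
            rw [hbd (k'+1) (by omega) le_rfl, Int.toNat_natCast]
            have hb := Nat.findGreatest_eq_iff.mp
              (show Nat.findGreatest (fun r => p.take r <:+ p.take (k'+1)) ((k'+1) - 1)
                  = pvBord p (k'+1) from rfl)
            simp only [Nat.add_sub_cancel] at hb
            have hble : pvBord p (k'+1) ≤ k' := hb.1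
            have hbsfx : p.take (pvBord p (k'+1)) <:+ p.take (k'+1) := by
              rcases Nat.eq_zero_or_pos (pvBord p (k'+1)) with hz | hpos
              · rw [hz]; simp
              · exact hb.2.1 (by omega)
            have ihb := ih (pvBord p (k'+1)) (by omega) (by omega) (hbsfx.trans hsfx)
              (fun i h1 h2 => hbd i h1 (by omega))
            rw [ihb]
            refine (pvFG_skip (by omega) ?_).symm
            intro r hr1 hr2 hQ
            rcases Nat.eq_or_lt_of_le hr2 with rfl | hrlt
            · exact hx hQ.2
            · have hrk : r ≤ k' := by omega
              have hsub : p.take r <:+ p.take (k'+1) := by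
                apply pvSuffix_of_suffix_le hQ.1 hsfx
                rw [List.length_take, List.length_take]
                omega
              exact hb.2.2 hr1 hrk hsub

theorem pvStep_eq {p u : List String} {x : String} {c : Int} {bd : List Int} (hp : p ≠ [])
    (hbd : ∀ i, 1 ≤ i → i ≤ p.length → PySem.List.pyGetD bd (i : Int) 0 = (pvBord p i : Int)) :
    pvKmpStep p bd p.length (c, pvK p u) x
      = (c + (if p <:+ u ++ [x] then 1 else 0), pvK p (u ++ [x])) := by
  have hm : 1 ≤ p.length := List.length_pos_iff.mpr hp
  have hKspec := Nat.findGreatest_eq_iff.mp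
    (show Nat.findGreatest (fun r => p.take r <:+ u) (p.length - 1) = pvK p u from rfl)
  have hKle : pvK p u ≤ p.length - 1 := hKspec.1
  have hKlt : pvK p u < p.length := by omega
  have hKsfx : p.take (pvK p u) <:+ u := by
    rcases Nat.eq_zero_or_pos (pvK p u) with hz | hpos
    · rw [hz]; simp
    · exact hKspec.2.1 (by omega)
  have hk1 := pvShift_eq (u := u) (x := x) (pvK p u) (pvK p u) le_rfl hKlt hKsfx
    (fun i h1 h2 => hbd i h1 (by omega))
  rw [pvKmpStep]
  rw [hk1]
  set k1 := Nat.findGreatest (fun r => p.take r <:+ u ∧ p.getD r "" = x) (pvK p u) with hk1def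
  have hk1spec := Nat.findGreatest_eq_iff.mp hk1def.symm
  have hk1K : k1 ≤ pvK p u := hk1spec.1
  have hk1m : k1 < p.length := by omega
  rw [PySem.List.pyGetD_natCast]
  by_cases hx : p.getD k1 "" = x
  · -- the scan extends the current partial match by one word
    have hbeq : (p.getD k1 "" == x) = true := by simpa using hx
    rw [if_pos hbeq]
    have hQk1 : p.take k1 <:+ u := by
      rcases Nat.eq_zero_or_pos k1 with hz | hpos
      · rw [hz]; simp
      · exact (hk1spec.2.1 (by omega)).1
    have hsnoc : p.take (k1 + 1) <:+ u ++ [x] := by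
      rw [pvTake_suffix_snoc (by omega) (by omega), Nat.add_sub_cancel]
      exact ⟨hQk1, hx⟩
    have hMspec := Nat.findGreatest_eq_iff.mp
      (show Nat.findGreatest (fun r => p.take r <:+ u ++ [x]) p.length
          = Nat.findGreatest (fun r => p.take r <:+ u ++ [x]) p.length from rfl)
    set M := Nat.findGreatest (fun r => p.take r <:+ u ++ [x]) p.length with hMdef
    have hMge : k1 + 1 ≤ M := Nat.le_findGreatest (by omega) hsnoc
    have hMle : M ≤ k1 + 1 := by
      by_contra hcon
      have hM1 : 1 ≤ M := by omega
      have hPM : p.take M <:+ u ++ [x] := hMspec.2.1 (by omega)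
      rw [pvTake_suffix_snoc (by omega) hMspec.1] at hPM
      have hMK : M - 1 ≤ pvK p u := Nat.le_findGreatest (by omega) hPM.1
      exact (hk1spec.2.2 (n := M - 1) (by omega) hMK) hPM
    have hM : M = k1 + 1 := by omega
    by_cases hfull : k1 + 1 = p.length
    · have hful : p <:+ u ++ [x] := by
        have := hsnoc; rw [hfull, List.take_length] at this; exact this
      rw [if_pos hfull, if_pos hful]
      rw [hbd p.length hm le_rfl, Int.toNat_natCast]
      have hK' : pvK p (u ++ [x]) = pvBord p p.length := by
        apply pvFG_congr
        intro r hr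
        constructor
        · intro hs
          rw [List.take_length]
          apply pvSuffix_of_suffix_le hs hful
          rw [List.length_take]; omega
        · intro hs
          rw [List.take_length] at hs
          exact hs.trans hful
      rw [hK']
    · have hnful : ¬ (p <:+ u ++ [x]) := by
        intro hful
        have : p.length ≤ M := Nat.le_findGreatest le_rfl
          (by rw [List.take_length]; exact hful)
        omega
      rw [if_neg hfull, if_neg hnful]
      have hK' : pvK p (u ++ [x]) = k1 + 1 := by
        apply Nat.findGreatest_eq_iff.mpr
        refine ⟨by omega, fun _ => hsnoc, ?_⟩
        intro n hn1 hn2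
        exact hMspec.2.2 (by omega) (by omega)
      rw [hK', add_zero]
  · -- mismatch at the fallback state: the state must be 0 and no new match ends here
    have hbeq : (p.getD k1 "" == x) = false := by simpa using hx
    have hk10 : k1 = 0 := by
      by_contra hcon
      exact hx (hk1spec.2.1 hcon).2
    have hnone : ∀ r, 1 ≤ r → r ≤ p.length → ¬ (p.take r <:+ u ++ [x]) := by
      intro r h1 h2 hs
      rw [pvTake_suffix_snoc h1 h2] at hs
      have hrK : r - 1 ≤ pvK p u := Nat.le_findGreatest (by omega) hs.1
      have hr0 : r - 1 = 0 := by
        by_contra hcon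
        have := hk1spec.2.2 (n := r - 1) (by omega) hrK
        exact this hs
      rw [hr0] at hs
      rw [hk10] at hx
      exact hx hs.2
    have hnful : ¬ (p <:+ u ++ [x]) := by
      intro hful
      exact hnone p.length hm le_rfl (by rw [List.take_length]; exact hful)
    have hK' : pvK p (u ++ [x]) = 0 := by
      apply Nat.findGreatest_eq_iff.mpr
      refine ⟨by omega, by omega, ?_⟩
      intro n hn1 hn2
      exact hnone n (by omega) (by omega)
    rw [hbeq]
    simp only [Bool.false_eq_true, if_false]
    rw [if_neg (show ¬ (k1 = p.length) by omega), if_neg hnful, hK', hk10, add_zero]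

theorem pvFold_eq {p : List String} {bd : List Int} (hp : p ≠ [])
    (hbd : ∀ i, 1 ≤ i → i ≤ p.length → PySem.List.pyGetD bd (i : Int) 0 = (pvBord p i : Int)) :
    ∀ (s u : List String) (c : Int),
    (s.foldl (pvKmpStep p bd p.length) (c, pvK p u)).1
      = c + ((List.range s.length).countP (fun j => decide (p <:+ u ++ s.take (j+1))) : Int) := by
  intro s
  induction s with
  | nil => intro u c; simp
  | cons w s' ih =>
      intro u c
      rw [List.foldl_cons, pvStep_eq hp hbd, ih (u ++ [w])]
      have hlen : (w :: s').length = s'.length + 1 := by simp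
      rw [hlen, List.range_succ_eq_map, List.countP_cons, List.countP_map]
      have hcomp : ((fun j => decide (p <:+ u ++ (w :: s').take (j+1))) ∘ Nat.succ)
          = (fun j => decide (p <:+ (u ++ [w]) ++ s'.take (j+1))) := by
        funext j
        simp only [Function.comp_apply, List.take_succ_cons, Nat.succ_eq_add_one]
        exact decide_eq_decide.mpr
          (by rw [show u ++ w :: s'.take (j+1) = (u ++ [w]) ++ s'.take (j+1) by simp])
      rw [hcomp]
      have h0 : (w :: s').take (0+1) = [w] := by simp
      by_cases h : p <:+ u ++ [w] <;> simp [h]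
      ring

theorem pvTableStep {p : List String} {bd : List Int} {k : Nat}
    (h2 : 2 ≤ k) (hk : k ≤ p.length)
    (hbd : ∀ i, 1 ≤ i → i ≤ k - 1 → PySem.List.pyGetD bd (i : Int) 0 = (pvBord p i : Int)) :
    pvBuildStep p bd (k : Int) = PySem.List.pySetD bd (k : Int) (pvBord p k : Int) := by
  rw [pvBuildStep]
  have hc1 : (k : Int) - 1 = ((k - 1 : Nat) : Int) := by omega
  have hbd' : bd.getD (k-1) 0 = (pvBord p (k-1) : Int) := by
    have := hbd (k-1) (by omega) le_rfl
    rwa [PySem.List.pyGetD_natCast] at this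
  simp only [hc1, PySem.List.pyGetD_natCast]
  rw [hbd', Int.toNat_natCast]
  set x := p.getD (k-1) "" with hxdef
  have hJ := Nat.findGreatest_eq_iff.mp
    (show Nat.findGreatest (fun r => p.take r <:+ p.take (k-1)) ((k-1) - 1)
        = pvBord p (k-1) from rfl)
  have hJle : pvBord p (k-1) ≤ k - 1 - 1 := hJ.1
  have hJsfx : p.take (pvBord p (k-1)) <:+ p.take (k-1) := by
    rcases Nat.eq_zero_or_pos (pvBord p (k-1)) with hz | hpos
    · rw [hz]; simp
    · exact hJ.2.1 (by omega)
  have hshift := pvShift_eq (u := p.take (k-1)) (x := x) (bd := bd)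
    (pvBord p (k-1)) (pvBord p (k-1)) le_rfl (by omega) hJsfx
    (fun i h1 h2 => hbd i h1 (by omega))
  rw [hshift]
  set j1 := Nat.findGreatest (fun r => p.take r <:+ p.take (k-1) ∧ p.getD r "" = x)
    (pvBord p (k-1)) with hj1def
  have hj1spec := Nat.findGreatest_eq_iff.mp hj1def.symm
  have hj1le : j1 ≤ pvBord p (k-1) := hj1spec.1
  have htake : p.take k = p.take (k-1) ++ [x] := by
    conv_lhs => rw [show k = (k-1) + 1 by omega]
    rw [List.take_add_one, List.getElem?_eq_getElem (by omega), hxdef,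
        List.getD_eq_getElem _ _ (by omega)]
    rfl
  have hsnociff : ∀ r, 1 ≤ r → r ≤ p.length →
      ((p.take r <:+ p.take k) ↔ (p.take (r-1) <:+ p.take (k-1) ∧ p.getD (r-1) "" = x)) := by
    intro r h1 hr
    rw [htake]
    exact pvTake_suffix_snoc h1 hr
  by_cases hx : p.getD j1 "" = x
  · rw [if_pos (by simpa using hx)]
    have hQj1 : p.take j1 <:+ p.take (k-1) := by
      rcases Nat.eq_zero_or_pos j1 with hz | hpos
      · rw [hz]; simp
      · exact (hj1spec.2.1 (by omega)).1
    have hB : pvBord p k = j1 + 1 := by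
      apply Nat.findGreatest_eq_iff.mpr
      refine ⟨by omega, ?_, ?_⟩
      · intro _
        rw [(hsnociff (j1+1) (by omega) (by omega)), Nat.add_sub_cancel]
        exact ⟨hQj1, hx⟩
      · intro n hn1 hn2
        rw [hsnociff n (by omega) (by omega)]
        intro hQn
        have hnJ : n - 1 ≤ pvBord p (k-1) := Nat.le_findGreatest (by omega) hQn.1
        exact hj1spec.2.2 (n := n - 1) (by omega) hnJ hQn
    rw [hB]
    norm_num
  · rw [if_neg (by simpa using hx)]
    have hj10 : j1 = 0 := by
      by_contra hcon
      exact hx (hj1spec.2.1 hcon).2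
    have hB : pvBord p k = 0 := by
      apply Nat.findGreatest_eq_iff.mpr
      refine ⟨by omega, by omega, ?_⟩
      intro n hn1 hn2
      rw [hsnociff n (by omega) (by omega)]
      intro hQn
      have hnJ : n - 1 ≤ pvBord p (k-1) := Nat.le_findGreatest (by omega) hQn.1
      rcases Nat.eq_zero_or_pos (n-1) with hz | hpos
      · rw [hz] at hQn
        rw [hj10] at hx
        exact hx hQn.2
      · have := hj1spec.2.2 (n := n - 1) (by omega) hnJ
        exact this hQn
    rw [hB, hj10]

theorem pvTableAux {p : List String} :
    ∀ K : Nat, 1 ≤ K → K ≤ p.length →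
    ((PySem.List.pyRange 2 ((K : Int) + 1) 1).foldl (pvBuildStep p)
        (PySem.List.pyRepeat [(0 : Int)] ((p.length : Int) + 1))).length = p.length + 1
    ∧ (∀ i, i ≤ K →
      PySem.List.pyGetD ((PySem.List.pyRange 2 ((K : Int) + 1) 1).foldl (pvBuildStep p)
        (PySem.List.pyRepeat [(0 : Int)] ((p.length : Int) + 1))) (i : Int) 0
        = (pvBord p i : Int)) := by
  intro K
  induction K with
  | zero => intro h _; omega
  | succ K' ih =>
      intro _ hK
      by_cases hK1 : K' = 0
      · subst hK1
        have hr : PySem.List.pyRange 2 ((1 : Nat) + 1 : Int) 1 = [] :=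
          PySem.List.pyRange_one_eq_nil (by omega)
        rw [show ((1:Nat) : Int) + 1 = (((1:Nat) + 1 : Nat) : Int) by omega] at hr ⊢
        rw [hr, List.foldl_nil]
        constructor
        · rw [PySem.List.pyRepeat_singleton]
          simp
        · intro i hi
          rw [PySem.List.pyRepeat_singleton, PySem.List.pyGetD_natCast]
          rw [List.getD_eq_getElem _ _ (by simp; omega), List.getElem_replicate]
          interval_cases i <;> rfl
      · have ihh := ih (by omega) (by omega)
        have hcast : ((K' + 1 : Nat) : Int) + 1 = ((K' : Int) + 1) + 1 := by push_cast; ring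
        have hr : PySem.List.pyRange 2 (((K' + 1 : Nat) : Int) + 1) 1
            = PySem.List.pyRange 2 ((K' : Int) + 1) 1 ++ [(K' : Int) + 1] := by
          rw [hcast]
          exact PySem.List.pyRange_one_succ_right (by omega)
        rw [hr, List.foldl_append, List.foldl_cons, List.foldl_nil]
        set bdK := (PySem.List.pyRange 2 ((K' : Int) + 1) 1).foldl (pvBuildStep p)
          (PySem.List.pyRepeat [(0 : Int)] ((p.length : Int) + 1)) with hbdK
        have hstep : pvBuildStep p bdK ((K' : Int) + 1)
            = PySem.List.pySetD bdK (((K' + 1 : Nat) : Int)) (pvBord p (K' + 1) : Int) := by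
          rw [show (K' : Int) + 1 = ((K' + 1 : Nat) : Int) by push_cast; ring]
          exact pvTableStep (by omega) (by omega)
            (fun i h1 h2 => ihh.2 i (by omega))
        rw [hstep, PySem.List.pySetD_natCast]
        have hlen : (bdK.set (K' + 1) (pvBord p (K' + 1) : Int)).length = p.length + 1 := by
          rw [List.length_set]; exact ihh.1
        refine ⟨hlen, ?_⟩
        intro i hi
        rw [PySem.List.pyGetD_natCast, List.getD_eq_getElem _ _ (by rw [hlen]; omega)]
        by_cases hiK : i = K' + 1
        · subst hiK
          rw [List.getElem_set_self]
        · rw [List.getElem_set_ne (by omega)]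
          have := ihh.2 i (by omega)
          rw [PySem.List.pyGetD_natCast, List.getD_eq_getElem _ _ (by rw [ihh.1]; omega)] at this
          exact this

theorem pvB_eq_occEnd {t p : List String} (hp : p ≠ []) :
    count_phrase_in_lemmas_py_alt t p
      = ((List.range (t.length + 1)).countP (fun j => decide (p <:+ t.take j)) : Int) := by
  have hm : 1 ≤ p.length := List.length_pos_iff.mpr hp
  have hK0 : pvK p [] = 0 := by
    apply Nat.findGreatest_eq_iff.mpr
    refine ⟨by omega, by omega, ?_⟩
    intro n hn1 _ hs
    have := List.suffix_nil.mp hs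
    rcases List.take_eq_nil_iff.mp this with h | h
    · omega
    · exact hp h
  rw [count_phrase_in_lemmas_py_alt]
  simp only [if_neg (show ¬ (p.length = 0) by omega)]
  rw [show ((0 : Int), (0 : Nat)) = ((0 : Int), pvK p []) by rw [hK0]]
  have htab := pvTableAux (p := p) p.length hm le_rfl
  rw [pvFold_eq hp (fun i _ h2 => htab.2 i h2) t [] 0]
  rw [List.range_succ_eq_map, List.countP_cons, List.countP_map]
  have hcomp : ((fun j => decide (p <:+ t.take j)) ∘ Nat.succ)
      = (fun j => decide (p <:+ t.take (j+1))) := rfl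
  rw [hcomp]
  simp [hp]
  rfl

-- ===== VERDICT (by name: the statement is the Claim_ definition above) =====
theorem count_phrase_in_lemmas_py_spec : Claim_equal_count_phrase_in_lemmas_py := by
  intro t p _dom
  unfold Spec_count_phrase_in_lemmas_py
  by_cases hp : p = []
  · subst hp
    simp [count_phrase_in_lemmas_py, count_phrase_in_lemmas_py_alt]
  · rw [pvA_eq_occEnd hp, pvB_eq_occEnd hp]
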